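-- pv_equiv track=rewrite | github.com/HiddenB1ue/vistaflow | apps/api/app/planner/filters.py | get_train_type
-- ===== SOURCE A (Python) =====
-- def get_train_type(train_code: str) -> str:
--     """从车次代码中提取车型前缀，如 'G101' → 'G'。"""
--     code = train_code.strip().upper()
--     if not code:
--         return ""
--     # 取开头连续的字母部分
--     prefix = ""
--     for ch in code:
--         if ch.isalpha():
--             prefix += ch
--         else:
--             break
--     return prefix
-- ===== SOURCE B (Python) =====
-- import re
--
-- _ALPHA_PREFIX = re.compile(r"[A-Za-z]+")
--
--
-- def get_train_type(train_code: str) -> str: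
--     """从车次代码中提取车型前缀，如 'G101' → 'G'。"""
--     m = _ALPHA_PREFIX.match(train_code.strip().upper())
--     return m.group(0) if m else ""
-- ===== Notes on version B (the rewrite author's own statement) =====
-- stated objective: idiomatic
-- what changed: Replaces the explicit char-by-char accumulation loop (with break and an empty-string guard) by a single anchored regex match of the leading [A-Za-z]+ run on the normalized code.
import Mathlib
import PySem

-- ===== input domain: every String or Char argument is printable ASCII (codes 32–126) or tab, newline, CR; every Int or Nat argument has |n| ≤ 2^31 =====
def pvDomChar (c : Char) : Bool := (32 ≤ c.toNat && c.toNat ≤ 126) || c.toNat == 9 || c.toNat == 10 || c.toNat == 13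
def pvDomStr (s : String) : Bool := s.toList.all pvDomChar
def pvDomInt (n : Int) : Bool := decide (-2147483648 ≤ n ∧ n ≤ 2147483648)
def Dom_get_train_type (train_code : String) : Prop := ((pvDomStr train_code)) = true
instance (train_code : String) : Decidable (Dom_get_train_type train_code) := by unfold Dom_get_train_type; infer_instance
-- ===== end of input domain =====

-- B replaces A's explicit accumulate-and-break loop by an anchored regex match
-- of the leading [A-Za-z]+ run (ported as takeWhile on the letter ranges); objective: idiomatic.

-- ===== PORT A =====
-- the 'for ch in code: if ch.isalpha(): prefix += ch else: break' loop, state = prefix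
def pvGoA : List Char → List Char → List Char
  | acc, [] => acc
  | acc, c :: rest => if PySem.Chars.isalpha c then pvGoA (acc ++ [c]) rest else acc

def get_train_type (train_code : String) : String :=
  let code := PySem.Str.upper (PySem.Str.strip train_code)
  if code = "" then ""
  else String.mk (pvGoA [] code.toList)

-- ===== PORT B =====
-- the regex character class [A-Za-z]
def pvReLetter (c : Char) : Bool := ('A' ≤ c && c ≤ 'Z') || ('a' ≤ c && c ≤ 'z')

-- re.match(r"[A-Za-z]+", code): the maximal leading run of class chars; no match → ""
def get_train_type_alt (train_code : String) : String :=
  String.mk ((PySem.Str.upper (PySem.Str.strip train_code)).toList.takeWhile pvReLetter)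

-- ===== PRECONDITION & SPEC =====
def Spec_get_train_type (train_code : String) (out : String) : Prop := out = get_train_type_alt train_code
instance (train_code : String) (out : String) : Decidable (Spec_get_train_type train_code out) := by unfold Spec_get_train_type; infer_instance

-- ===== CLAIM (what is proved, stated in full; the proofs are below) =====
def Claim_equal_get_train_type : Prop := ∀ (train_code : String), Dom_get_train_type train_code → Spec_get_train_type train_code (get_train_type train_code)

-- ===== LEMMAS AND PROOFS =====

-- the two per-char facts, checked over all 128 ASCII codes at once
set_option maxRecDepth 4096 in
theorem pvTable : (List.range 128).all
    (fun n => (PySem.Chars.isalpha (Char.ofNat n) == pvReLetter (Char.ofNat n))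
      && decide ((PySem.Chars.upperChar (Char.ofNat n)).toNat < 128)) = true := by decide

theorem pvIsalpha_eq (c : Char) (h : c.toNat < 128) :
    PySem.Chars.isalpha c = pvReLetter c := by
  have := List.all_eq_true.mp pvTable c.toNat (List.mem_range.mpr h)
  rw [Char.ofNat_toNat] at this
  exact eq_of_beq (Bool.and_elim_left this)

theorem pvUpper_lt (c : Char) (h : c.toNat < 128) :
    (PySem.Chars.upperChar c).toNat < 128 := by
  have := List.all_eq_true.mp pvTable c.toNat (List.mem_range.mpr h)
  rw [Char.ofNat_toNat] at this
  exact of_decide_eq_true (Bool.and_elim_right this)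

theorem pvCharLt128 (c : Char) (h : pvDomChar c = true) : c.toNat < 128 := by
  simp [pvDomChar] at h; omega

theorem pvMem_strip {c : Char} {l : List Char} (h : c ∈ PySem.Chars.strip l) : c ∈ l := by
  simp only [PySem.Chars.strip, PySem.Chars.rstrip, PySem.Chars.lstrip, List.mem_reverse] at h
  exact (List.dropWhile_sublist _).mem (List.mem_reverse.mp ((List.dropWhile_sublist _).mem h))

theorem pvGoA_eq (cs : List Char) (acc : List Char) (h : ∀ c ∈ cs, c.toNat < 128) :
    pvGoA acc cs = acc ++ cs.takeWhile pvReLetter := by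
  induction cs generalizing acc with
  | nil => simp [pvGoA]
  | cons c rest ih =>
    have hc := pvIsalpha_eq c (h c (List.mem_cons_self ..))
    by_cases ha : pvReLetter c = true
    · simp [pvGoA, hc, ha, ih _ (fun d hd => h d (List.mem_cons_of_mem _ hd))]
    · simp [pvGoA, hc, (Bool.eq_false_iff.mpr ha : pvReLetter c = false)]

-- ===== VERDICT (by name: the statement is the Claim_ definition above) =====
theorem get_train_type_spec : Claim_equal_get_train_type := by
  intro s hDom
  unfold Spec_get_train_type get_train_type get_train_type_alt
  have hmem : ∀ c ∈ (PySem.Str.upper (PySem.Str.strip s)).toList, c.toNat < 128 := by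
    intro c hc
    rw [PySem.Str.toList_upper, PySem.Str.toList_strip, PySem.Chars.upper] at hc
    obtain ⟨d, hd, rfl⟩ := List.mem_map.mp hc
    exact pvUpper_lt d (pvCharLt128 d (List.all_eq_true.mp hDom d (pvMem_strip hd)))
  by_cases h : PySem.Str.upper (PySem.Str.strip s) = ""
  · simp only [h]; rfl
  · simp only [h, reduceIte]
    rw [pvGoA_eq _ _ hmem, List.nil_append]
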